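-- pv_equiv track=rewrite | github.com/g-yunjh/ps | 프로그래머스/2/138476. 귤 고르기/귤 고르기.py | solution
-- ===== SOURCE A (Python) =====
-- def solution(k, tangerine):
--     tangerine.sort()
--     tmp = 0
--     cnt = 0
--     arr = []
--     for t in tangerine:
--         if t != tmp and cnt != 0:
--             arr.append([tmp, cnt])
--             tmp = t
--             cnt = 1
--         elif cnt == 0:
--             tmp = t
--             cnt = 1
--         else:
--             cnt += 1
--     arr.append([tmp, cnt])
--
--     arr.sort(key = lambda x : x[1], reverse = True)
--
--     for i in range(len(arr)):
--         if k - arr[i][1] <= 0: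
--             return i + 1
--         else:
--             k -= arr[i][1]
-- ===== SOURCE B (Python) =====
-- def solution(k, tangerine):
--     # count each kind by hashing, then a histogram of counts; walk count values
--     # downward by integer countdown (counting sort), no comparison sort at all.
--     # NOTE: unlike A, this does not sort `tangerine` in place (return value only).
--     counts = {}
--     for t in tangerine:
--         counts[t] = counts.get(t, 0) + 1
--     freq = {}
--     maxc = 0
--     for c in counts.values():
--         freq[c] = freq.get(c, 0) + 1
--         if c > maxc:
--             maxc = c
--     kinds = 0
--     c = maxc
--     while c > 0:
--         m = freq.get(c, 0)
--         while m > 0: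
--             kinds += 1
--             k -= c
--             if k <= 0:
--                 return kinds
--             m -= 1
--         c -= 1
-- ===== Notes on version B (the rewrite author's own statement) =====
-- stated objective: alternative
-- what changed: A sorts the list, run-groups it, then comparison-sorts the group sizes and greedily subtracts; B never sorts anything: it hash-counts kinds, builds a histogram of the counts (frequency of frequencies) and walks count values downward by integer countdown (a counting sort), taking kinds as it goes; B does not mutate `tangerine` (A sorts it in place) - the equivalence is about the return value.
-- outside the precondition, e.g. on solution(0, []): A returns 1, B returns None
import Mathlib
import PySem

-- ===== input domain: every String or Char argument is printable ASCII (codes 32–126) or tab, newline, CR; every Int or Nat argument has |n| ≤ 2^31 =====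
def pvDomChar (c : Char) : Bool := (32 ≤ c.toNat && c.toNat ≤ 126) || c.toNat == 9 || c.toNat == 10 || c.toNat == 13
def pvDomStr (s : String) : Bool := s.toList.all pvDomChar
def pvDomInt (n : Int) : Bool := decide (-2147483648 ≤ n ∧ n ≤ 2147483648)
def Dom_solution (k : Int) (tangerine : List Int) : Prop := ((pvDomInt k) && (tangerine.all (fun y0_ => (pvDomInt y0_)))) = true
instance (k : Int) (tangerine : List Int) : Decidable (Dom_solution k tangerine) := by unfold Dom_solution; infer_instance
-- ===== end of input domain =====

-- B drops A's sorting entirely: hash counts, a histogram of counts, and an integer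
-- countdown over count values (counting sort). A sorts `tangerine` in place and B does
-- not: the equivalence is about the return value only.

-- ===== PORT A =====
-- one step of A's grouping loop; state = (tmp, cnt, arr)
def pvStepA (st : Int × Int × List (Int × Int)) (t : Int) : Int × Int × List (Int × Int) :=
  if t ≠ st.1 ∧ st.2.1 ≠ 0 then (t, 1, st.2.2 ++ [(st.1, st.2.1)])
  else if st.2.1 = 0 then (t, 1, st.2.2)
  else (st.1, st.2.1 + 1, st.2.2)

-- A's final loop over range(len(arr)): index i, running k; none = Python falls off and returns None
def pvLoopA : List (Int × Int) → Int → Int → Option Int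
  | [], _, _ => none
  | p :: rest, k, i => if k - p.2 ≤ 0 then some (i + 1) else pvLoopA rest (k - p.2) (i + 1)

def solution (k : Int) (tangerine : List Int) : Int :=
  let s := PySem.List.sorted tangerine (fun x => x) false
  let st := s.foldl pvStepA (0, 0, [])
  let arr := st.2.2 ++ [(st.1, st.2.1)]
  let arr2 := PySem.List.sorted arr (fun x => x.2) true
  (pvLoopA arr2 k 0).getD 0   -- Python returns None when the loop exhausts; Pre_ excludes that

-- ===== PORT B =====
-- inner 'while m > 0' loop; Sum.inl = function returned kinds, Sum.inr = loop finished with (kinds, k)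
def pvInnerB (c m kinds k : Int) : Int ⊕ (Int × Int) :=
  if 0 < m then
    if k - c ≤ 0 then Sum.inl (kinds + 1)
    else pvInnerB c (m - 1) (kinds + 1) (k - c)
  else Sum.inr (kinds, k)
termination_by m.toNat
decreasing_by omega

-- outer 'while c > 0' countdown over count values
def pvOuterB (freq : PySem.Dict Int Int) (c kinds k : Int) : Option Int :=
  if 0 < c then
    match pvInnerB c (freq.getD c 0) kinds k with
    | Sum.inl r => some r
    | Sum.inr p => pvOuterB freq (c - 1) p.1 p.2
  else none
termination_by c.toNat
decreasing_by omega

def solution_alt (k : Int) (tangerine : List Int) : Int :=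
  let counts := tangerine.foldl (fun (d : PySem.Dict Int Int) t => d.modify t 0 (· + 1)) PySem.Dict.empty
  let fm := counts.values.foldl
    (fun (st : PySem.Dict Int Int × Int) c =>
      (st.1.modify c 0 (· + 1), if c > st.2 then c else st.2)) (PySem.Dict.empty, 0)
  (pvOuterB fm.1 fm.2 0 k).getD 0   -- Python returns None when the loop exhausts; Pre_ excludes that

-- ===== PRECONDITION & SPEC =====
-- Pre_ excludes the empty list, where A counts a phantom [0,0] group (returning 1 whenever
-- k <= 0 while B's loops never run and B returns None), and k > len(tangerine), where both
-- final loops fall off the end and return None instead of an int.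
def Pre_solution (k : Int) (tangerine : List Int) : Prop :=
  tangerine ≠ [] ∧ k ≤ (tangerine.length : Int)
instance (k : Int) (tangerine : List Int) : Decidable (Pre_solution k tangerine) := by
  unfold Pre_solution; infer_instance

def pvWitness_solution : Int × List Int := (4, [1, 2, 2, 3, 3, 3])

def Spec_solution (k : Int) (tangerine : List Int) (out : Int) : Prop := out = solution_alt k tangerine
instance (k : Int) (tangerine : List Int) (out : Int) : Decidable (Spec_solution k tangerine out) := by unfold Spec_solution; infer_instance

-- ===== CLAIM (what is proved, stated in full; the proofs are below) =====
def Claim_equal_solution : Prop := ∀ (k : Int) (tangerine : List Int), Dom_solution k tangerine → Pre_solution k tangerine → Spec_solution k tangerine (solution k tangerine)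

-- ===== LEMMAS AND PROOFS =====

-- descending-sorted greedy loop shared by both characterisations (proof device only)
def pvLoopB : List Int → Int → Int → Option Int
  | [], _, _ => none
  | c :: rest, i, k => if k - c ≤ 0 then some (i + 1) else pvLoopB rest (i + 1) (k - c)

theorem pvLoopA_eq_loopB (arr : List (Int × Int)) (k i : Int) :
    pvLoopA arr k i = pvLoopB (arr.map Prod.snd) i k := by
  induction arr generalizing k i with
  | nil => rfl
  | cons p rest ih => simp [pvLoopA, pvLoopB, ih]

-- the canonical group list of a list: distinct values in first-occurrence order with their counts
def pvCanon (s : List Int) : List (Int × Int) :=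
  (PySem.Set.ofList s).map (fun v => (v, (s.count v : Int)))

-- "arr.append([tmp, cnt])" applied to the final fold state
def pvFinish (st : Int × Int × List (Int × Int)) : List (Int × Int) :=
  st.2.2 ++ [(st.1, st.2.1)]

theorem pvDiscard_not_mem {s : PySem.Set Int} {x : Int} (h : x ∉ s) :
    PySem.Set.discard s x = s := by
  induction s with
  | nil => rfl
  | cons a t ih =>
      simp only [List.mem_cons, not_or] at h
      have hax : (a == x) = false := by
        simp only [beq_eq_false_iff_ne, ne_eq]
        exact fun heq => h.1 heq.symm
      simp [PySem.Set.discard, hax]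
      exact fun a ha heq => h.2 (heq ▸ ha)

theorem pvOfList_replicate_append (m : Nat) (b : Int) (t : List Int) (ht : b ∉ t) :
    PySem.Set.ofList (List.replicate (m + 1) b ++ t) = b :: PySem.Set.ofList t := by
  induction m with
  | zero =>
      rw [List.replicate_one, List.singleton_append, PySem.Set.ofList_cons,
        pvDiscard_not_mem (by simpa [PySem.Set.mem_ofList] using ht)]
  | succ n ih =>
      rw [List.replicate_succ, List.cons_append, PySem.Set.ofList_cons, ih]
      simp [PySem.Set.discard]
      exact fun a ha heq => ht (heq ▸ ha)

theorem pvCanon_chunk (m : Nat) (b : Int) (t : List Int) (ht : b ∉ t) :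
    pvCanon (List.replicate (m + 1) b ++ t) = (b, ((m : Int) + 1)) :: pvCanon t := by
  unfold pvCanon
  rw [pvOfList_replicate_append m b t ht, List.map_cons]
  refine List.cons_eq_cons.mpr ⟨?_, ?_⟩
  · have h1 : (List.replicate (m + 1) b ++ t).count b = m + 1 := by
      simp [List.count_append, List.count_eq_zero.mpr ht]
    rw [h1]; push_cast; ring_nf
  · apply List.map_congr_left
    intro v hv
    have hvt : v ∈ t := (PySem.Set.mem_ofList t v).mp hv
    have hvb : v ≠ b := fun h => ht (h ▸ hvt)
    simp only [List.count_append, List.count_replicate]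
    have hbv : ¬ b = v := fun h => hvb h.symm
    simp [hbv]

-- the head of a sorted cons starts a run: pvCanon of x :: s' splits off x's whole run
theorem pvCanon_cons (x : Int) (s' : List Int)
    (hsort' : s'.Pairwise (· ≤ ·)) (hxle : ∀ y ∈ s', x ≤ y) :
    pvCanon (x :: s') = (x, 1 + (s'.count x : Int)) ::
      pvCanon (s'.dropWhile (fun y => y == x)) := by
  have htw : s'.takeWhile (fun y => y == x) =
      List.replicate (s'.takeWhile (fun y => y == x)).length x :=
    List.eq_replicate_of_mem (fun y hy => by
      simpa using List.mem_takeWhile_imp hy)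
  have hdecomp : x :: s' =
      List.replicate ((s'.takeWhile (fun y => y == x)).length + 1) x ++
        s'.dropWhile (fun y => y == x) := by
    rw [List.replicate_succ, List.cons_append, ← htw, List.takeWhile_append_dropWhile]
  have hxnotdrop : x ∉ s'.dropWhile (fun y => y == x) := by
    intro hmem
    match hdw : s'.dropWhile (fun y => y == x) with
    | [] => rw [hdw] at hmem; exact absurd hmem (List.not_mem_nil)
    | z :: zs =>
        have hne' : s'.dropWhile (fun y => y == x) ≠ [] := by simp [hdw]
        have h0 := List.head_dropWhile_not (fun y => y == x) hne'
        have hz : (s'.dropWhile (fun y => y == x)).head hne' = z := by simp [hdw]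
        rw [hz] at h0
        have hzx : z ≠ x := by simpa using h0
        have hzmem : z ∈ s' := (List.dropWhile_sublist (fun y => y == x)).subset (by simp [hdw])
        have hxz : x ≤ z := hxle z hzmem
        rw [hdw] at hmem
        rcases List.mem_cons.mp hmem with h' | h'
        · exact hzx h'.symm
        · have hsubl : (z :: zs).Sublist s' := hdw ▸ List.dropWhile_sublist _
          have hpw : (z :: zs).Pairwise (· ≤ ·) := List.Pairwise.sublist hsubl hsort'
          have hzle : z ≤ x := (List.pairwise_cons.mp hpw).1 x h'
          exact hzx (le_antisymm hzle hxz)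
  have hcnt : s'.count x = (s'.takeWhile (fun y => y == x)).length := by
    conv_lhs => rw [← List.takeWhile_append_dropWhile (p := fun y => y == x) (l := s')]
    rw [List.count_append, List.count_eq_zero.mpr hxnotdrop, Nat.add_zero]
    rw [List.count_eq_length.mpr]
    intro y hy
    have h4 : y = x := by simpa using List.mem_takeWhile_imp hy
    exact h4.symm
  have hch := pvCanon_chunk (s'.takeWhile (fun y => y == x)).length x
    (s'.dropWhile (fun y => y == x)) hxnotdrop
  rw [← hdecomp] at hch
  rw [hch, hcnt]
  refine List.cons_eq_cons.mpr ⟨?_, rfl⟩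
  rw [add_comm]

-- the grouping-loop invariant: from a live run (b, c) over a sorted tail of elements ≥ b
theorem pvFold_invariant (n : Nat) :
    ∀ (s : List Int), s.length ≤ n → s.Pairwise (· ≤ ·) →
    ∀ (b c : Int) (acc : List (Int × Int)), 1 ≤ c → (∀ x ∈ s, b ≤ x) →
    pvFinish (s.foldl pvStepA (b, c, acc)) =
      acc ++ (b, c + s.count b) :: pvCanon (s.dropWhile (fun x => x == b)) := by
  induction n with
  | zero =>
      intro s hs _ b c acc hc _
      have : s = [] := List.eq_nil_of_length_eq_zero (Nat.le_zero.mp hs)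
      subst this; simp [pvCanon, pvFinish]
  | succ n ih =>
      intro s hs hsort b c acc hc hge
      match s with
      | [] => simp [pvCanon, pvFinish]
      | x :: s' =>
          have hlen : s'.length ≤ n := by simpa using Nat.succ_le_succ_iff.mp hs
          have hsort' : s'.Pairwise (· ≤ ·) := hsort.of_cons
          have hxle : ∀ y ∈ s', x ≤ y := fun y hy => (List.pairwise_cons.mp hsort).1 y hy
          by_cases hxb : x = b
          · subst hxb
            have hstep : pvStepA (x, c, acc) x = (x, c + 1, acc) := by
              simp [pvStepA]
            rw [List.foldl_cons, hstep,
              ih s' hlen hsort' x (c + 1) acc (by omega) hxle]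
            have h1 : (x :: s').count x = s'.count x + 1 := by simp
            rw [h1, List.dropWhile_cons]
            simp only [beq_self_eq_true, if_true]
            have h2 : (c + 1) + (s'.count x : Int) = c + ((s'.count x + 1 : Nat) : Int) := by
              push_cast; ring
            rw [h2]
          · have hstep : pvStepA (b, c, acc) x = (x, 1, acc ++ [(b, c)]) := by
              simp only [pvStepA, ne_eq]
              rw [if_pos ⟨hxb, by omega⟩]
            rw [List.foldl_cons, hstep,
              ih s' hlen hsort' x 1 (acc ++ [(b, c)]) le_rfl hxle]
            have hbcount : (x :: s').count b = 0 := by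
              rw [List.count_eq_zero]
              intro hmem
              have hbx : b < x := lt_of_le_of_ne (hge x (List.mem_cons_self)) (Ne.symm hxb)
              rcases List.mem_cons.mp hmem with h | h
              · exact hxb h.symm
              · exact absurd (hxle b h) (by omega)
            have hbdrop : (x :: s').dropWhile (fun y => y == b) = x :: s' := by
              rw [List.dropWhile_cons]
              simp [hxb]
            rw [hbcount, hbdrop, pvCanon_cons x s' hsort' hxle]
            simp

-- A's grouping fold over a sorted nonempty list produces the canonical group list
theorem pvFold_canon (s : List Int) (hsort : s.Pairwise (· ≤ ·)) (hne : s ≠ []) :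
    pvFinish (s.foldl pvStepA (0, 0, [])) = pvCanon s := by
  match s with
  | x :: s' =>
      have hsort' : s'.Pairwise (· ≤ ·) := hsort.of_cons
      have hxle : ∀ y ∈ s', x ≤ y := fun y hy => (List.pairwise_cons.mp hsort).1 y hy
      have hstep : pvStepA (0, 0, []) x = (x, 1, []) := by
        simp [pvStepA]
      rw [List.foldl_cons, hstep,
        pvFold_invariant s'.length s' le_rfl hsort' x 1 [] le_rfl hxle,
        pvCanon_cons x s' hsort' hxle]
      simp

-- mapping snd over A's pair sort equals the plain descending sort of the snds
theorem pvSortSnd (arr : List (Int × Int)) :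
    (PySem.List.sorted arr (fun x => x.2) true).map Prod.snd
      = PySem.List.sorted (arr.map Prod.snd) (fun x => x) true := by
  have hperm : ((PySem.List.sorted arr (fun x => x.2) true).map Prod.snd).Perm
      (PySem.List.sorted (arr.map Prod.snd) (fun x => x) true) := by
    refine ((PySem.List.sorted_perm _ _ _).map Prod.snd).trans ?_
    exact (PySem.List.sorted_perm _ _ _).symm
  have p1 : ((PySem.List.sorted arr (fun x => x.2) true).map Prod.snd).Pairwise
      (fun a b : Int => b ≤ a) :=
    List.pairwise_map.mpr (PySem.List.sorted_pairwise_rev arr (fun x => x.2))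
  have p2 : (PySem.List.sorted (arr.map Prod.snd) (fun x => x) true).Pairwise
      (fun a b : Int => b ≤ a) :=
    PySem.List.sorted_pairwise_rev (arr.map Prod.snd) (fun x => x)
  exact List.Perm.eq_of_pairwise (fun a b _ _ h1 h2 => le_antisymm h2 h1) p1 p2 hperm

-- ==== B-side lemmas ====

-- the pair fold of solution_alt splits into the counter fold and the max fold
theorem pvPairFold (vals : List Int) (d : PySem.Dict Int Int) (mx : Int) :
    vals.foldl (fun (st : PySem.Dict Int Int × Int) c =>
        (st.1.modify c 0 (· + 1), if c > st.2 then c else st.2)) (d, mx)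
      = (vals.foldl (fun d c => d.modify c 0 (· + 1)) d,
         vals.foldl (fun mx c => if c > mx then c else mx) mx) := by
  induction vals generalizing d mx with
  | nil => rfl
  | cons c rest ih => simp [List.foldl_cons, ih]

theorem pvMaxFold_ge_init (vals : List Int) (mx : Int) :
    mx ≤ vals.foldl (fun mx c => if c > mx then c else mx) mx := by
  induction vals generalizing mx with
  | nil => simp
  | cons c rest ih =>
      refine le_trans ?_ (ih (if c > mx then c else mx))
      split_ifs with h <;> omega

theorem pvMaxFold_ge_mem (vals : List Int) (mx : Int) :
    ∀ v ∈ vals, v ≤ vals.foldl (fun mx c => if c > mx then c else mx) mx := by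
  induction vals generalizing mx with
  | nil => intro v hv; simp at hv
  | cons c rest ih =>
      intro v hv
      rcases List.mem_cons.mp hv with h | h
      · subst h
        refine le_trans ?_ (pvMaxFold_ge_init rest (if v > mx then v else mx))
        split_ifs with h <;> omega
      · exact ih _ v h

-- the countdown's implicit list: for each value c, c-1, …, 1 its histogram count of copies
def pvDescList (freq : PySem.Dict Int Int) (c : Int) : List Int :=
  if 0 < c then List.replicate (freq.getD c 0).toNat c ++ pvDescList freq (c - 1) else []
termination_by c.toNat
decreasing_by omega

theorem pvInnerB_loop (c : Int) : ∀ (n : Nat) (m kinds k : Int), m.toNat = n → ∀ rest,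
    (match pvInnerB c m kinds k with
     | Sum.inl r => some r
     | Sum.inr p => pvLoopB rest p.1 p.2)
      = pvLoopB (List.replicate m.toNat c ++ rest) kinds k := by
  intro n
  induction n with
  | zero =>
      intro m kinds k hm rest
      have hm0 : ¬ 0 < m := by omega
      rw [pvInnerB, if_neg hm0, hm]
      simp
  | succ n ih =>
      intro m kinds k hm rest
      have hm0 : 0 < m := by omega
      rw [pvInnerB, if_pos hm0, hm, List.replicate_succ, List.cons_append]
      by_cases hk : k - c ≤ 0
      · simp [pvLoopB, hk]
      · rw [if_neg hk]
        have hm1 : (m - 1).toNat = n := by omega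
        rw [ih (m - 1) (kinds + 1) (k - c) hm1 rest]
        simp [pvLoopB, hk, hm1]

theorem pvOuterB_loop : ∀ (n : Nat) (c : Int), c.toNat = n →
    ∀ (freq : PySem.Dict Int Int) (kinds k : Int),
    pvOuterB freq c kinds k = pvLoopB (pvDescList freq c) kinds k := by
  intro n
  induction n with
  | zero =>
      intro c hc freq kinds k
      have hc0 : ¬ 0 < c := by omega
      rw [pvOuterB, if_neg hc0, pvDescList, if_neg hc0]
      rfl
  | succ n ih =>
      intro c hc freq kinds k
      have hc0 : 0 < c := by omega
      rw [pvOuterB, if_pos hc0, pvDescList, if_pos hc0]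
      have hmain := pvInnerB_loop c (freq.getD c 0).toNat (freq.getD c 0) kinds k rfl
        (pvDescList freq (c - 1))
      rw [← hmain]
      cases hInner : pvInnerB c (freq.getD c 0) kinds k with
      | inl r => rfl
      | inr p => exact ih (c - 1) (by omega) freq p.1 p.2

theorem pvDescList_count (freq : PySem.Dict Int Int) : ∀ (n : Nat) (c : Int), c.toNat = n →
    ∀ v, (pvDescList freq c).count v = if 0 < v ∧ v ≤ c then (freq.getD v 0).toNat else 0 := by
  intro n
  induction n with
  | zero =>
      intro c hc v
      have hc0 : ¬ 0 < c := by omega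
      rw [pvDescList, if_neg hc0]
      have : ¬ (0 < v ∧ v ≤ c) := by omega
      simp [this]
  | succ n ih =>
      intro c hc v
      have hc0 : 0 < c := by omega
      rw [pvDescList, if_pos hc0, List.count_append, List.count_replicate,
        ih (c - 1) (by omega) v]
      by_cases hv : v = c
      · subst hv
        have h1 : ¬ (0 < v ∧ v ≤ v - 1) := by omega
        have h2 : 0 < v ∧ v ≤ v := by omega
        simp [h2]
      · have hne : ¬ (c = v) := fun h => hv h.symm
        have hiff : (0 < v ∧ v ≤ c - 1) ↔ (0 < v ∧ v ≤ c) := by omega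
        simp only [hiff]
        simp [hne]

theorem pvDescList_mem (freq : PySem.Dict Int Int) (c v : Int)
    (hv : v ∈ pvDescList freq c) : 0 < v ∧ v ≤ c := by
  have hcount : 0 < (pvDescList freq c).count v := List.count_pos_iff.mpr hv
  rw [pvDescList_count freq c.toNat c rfl v] at hcount
  by_contra h
  simp [h] at hcount

theorem pvDescList_pairwise (freq : PySem.Dict Int Int) : ∀ (n : Nat) (c : Int), c.toNat = n →
    (pvDescList freq c).Pairwise (fun a b : Int => b ≤ a) := by
  intro n
  induction n with
  | zero =>
      intro c hc
      have hc0 : ¬ 0 < c := by omega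
      rw [pvDescList, if_neg hc0]
      exact List.Pairwise.nil
  | succ n ih =>
      intro c hc
      have hc0 : 0 < c := by omega
      rw [pvDescList, if_pos hc0, List.pairwise_append]
      refine ⟨?_, ih (c - 1) (by omega), ?_⟩
      · exact List.pairwise_replicate.mpr (Or.inr le_rfl)
      · intro a ha b hb
        have ha' : a = c := List.eq_of_mem_replicate ha
        have hb' := pvDescList_mem freq (c - 1) b hb
        omega

-- the countdown list over the counts histogram IS the descending sort of the count values
theorem pvDescList_eq_sortedDesc (vals : List Int) (mx : Int)
    (hpos : ∀ v ∈ vals, 0 < v)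
    (hmx : ∀ v ∈ vals, v ≤ mx) :
    pvDescList (PySem.Dict.counter vals) mx = PySem.List.sorted vals (fun x => x) true := by
  have hperm1 : (pvDescList (PySem.Dict.counter vals) mx).Perm vals := by
    rw [List.perm_iff_count]
    intro v
    rw [pvDescList_count (PySem.Dict.counter vals) mx.toNat mx rfl v]
    by_cases h : 0 < v ∧ v ≤ mx
    · rw [if_pos h, PySem.Dict.getD_counter]
      simp
    · rw [if_neg h]
      symm
      rw [List.count_eq_zero]
      intro hv
      exact h ⟨hpos v hv, hmx v hv⟩
  have hperm : (pvDescList (PySem.Dict.counter vals) mx).Perm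
      (PySem.List.sorted vals (fun x => x) true) :=
    hperm1.trans (PySem.List.sorted_perm _ _ _).symm
  exact List.Perm.eq_of_pairwise (fun a b _ _ h1 h2 => le_antisymm h2 h1)
    (pvDescList_pairwise _ mx.toNat mx rfl)
    (PySem.List.sorted_pairwise_rev vals (fun x => x)) hperm

-- A's count multiset (over the sorted list) and B's (counter values) are permutations
theorem pvVals_perm (tangerine : List Int) :
    ((pvCanon (PySem.List.sorted tangerine (fun x => x) false)).map Prod.snd).Perm
      ((PySem.Dict.counter tangerine).values) := by
  have hs := PySem.List.sorted_perm tangerine (fun x => x) false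
  have hvB : (PySem.Dict.counter tangerine).values
      = (PySem.Set.ofList tangerine).map (fun u => (tangerine.count u : Int)) := by
    simp only [PySem.Dict.values, PySem.Dict.items_counter, List.map_map]
    rfl
  have hvA : (pvCanon (PySem.List.sorted tangerine (fun x => x) false)).map Prod.snd
      = (PySem.Set.ofList (PySem.List.sorted tangerine (fun x => x) false)).map
          (fun u => (tangerine.count u : Int)) := by
    unfold pvCanon
    rw [List.map_map]
    apply List.map_congr_left
    intro u _
    simp [hs.count_eq]
  rw [hvA, hvB]
  apply List.Perm.map
  rw [List.perm_ext_iff_of_nodup (PySem.Set.nodup_ofList _) (PySem.Set.nodup_ofList _)]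
  intro u
  rw [PySem.Set.mem_ofList, PySem.Set.mem_ofList, hs.mem_iff]

theorem pvVals_pos (tangerine : List Int) (v : Int)
    (hv : v ∈ (PySem.Dict.counter tangerine).values) : 0 < v := by
  have hvB : (PySem.Dict.counter tangerine).values
      = (PySem.Set.ofList tangerine).map (fun u => (tangerine.count u : Int)) := by
    simp only [PySem.Dict.values, PySem.Dict.items_counter, List.map_map]
    rfl
  rw [hvB] at hv
  obtain ⟨u, hu, rfl⟩ := List.mem_map.mp hv
  have hum : u ∈ tangerine := (PySem.Set.mem_ofList _ _).mp hu
  have : 0 < tangerine.count u := List.count_pos_iff.mpr hum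
  omega

-- ===== VERDICT (by name: the statement is the Claim_ definition above) =====
theorem solution_spec : Claim_equal_solution := by
  intro k tangerine _ hpre
  unfold Spec_solution solution solution_alt
  obtain ⟨hne, -⟩ := hpre
  -- A side
  have hsort : (PySem.List.sorted tangerine (fun x => x) false).Pairwise (· ≤ ·) :=
    PySem.List.sorted_pairwise tangerine (fun x => x)
  have hsne : PySem.List.sorted tangerine (fun x => x) false ≠ [] := by
    rw [Ne, PySem.List.sorted_eq_nil_iff]; exact hne
  have hfold := pvFold_canon _ hsort hsne
  simp only [pvFinish] at hfold
  -- B side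
  have hcounter : tangerine.foldl
      (fun (d : PySem.Dict Int Int) t => d.modify t 0 (· + 1)) PySem.Dict.empty
      = PySem.Dict.counter tangerine := rfl
  simp only [hfold, hcounter, pvPairFold, pvLoopA_eq_loopB, pvSortSnd]
  set vals := (PySem.Dict.counter tangerine).values with hvals
  set mx := vals.foldl (fun mx c => if c > mx then c else mx) 0 with hmx
  rw [pvOuterB_loop mx.toNat mx rfl, ← PySem.Dict.counter_eq_foldl,
    pvDescList_eq_sortedDesc vals mx
      (fun v hv => pvVals_pos tangerine v hv)
      (fun v hv => pvMaxFold_ge_mem vals 0 v hv)]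
  -- the two count multisets sort to the same descending list
  have hperm := pvVals_perm tangerine
  have p1 := PySem.List.sorted_pairwise_rev
    ((pvCanon (PySem.List.sorted tangerine (fun x => x) false)).map Prod.snd) (fun x : Int => x)
  have p2 := PySem.List.sorted_pairwise_rev vals (fun x : Int => x)
  have heq : PySem.List.sorted
      ((pvCanon (PySem.List.sorted tangerine (fun x => x) false)).map Prod.snd)
      (fun x => x) true = PySem.List.sorted vals (fun x => x) true := by
    refine List.Perm.eq_of_pairwise (fun a b _ _ h1 h2 => le_antisymm h2 h1) p1 p2 ?_
    exact (PySem.List.sorted_perm _ _ _).trans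
      (hperm.trans (PySem.List.sorted_perm _ _ _).symm)
  rw [heq]
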